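-- pv_equiv track=rewrite | github.com/mruderman/subjective-priority-driven-swarm | spds/meeting_templates.py | _generate_formal_discussion_summary
-- ===== SOURCE A (Python) =====
-- from typing import Any, Dict, List, Optional
--
-- def _generate_formal_discussion_summary(
--     conversation_log: List[Dict], participants: List
-- ) -> str:
--     """Generate a formal summary of the discussion."""
--     if not conversation_log:
--         return "No detailed discussion recorded."
--
--     # Count substantive messages (longer than 20 characters)
--     substantive_messages = [
--         entry for entry in conversation_log if len(entry.get("message", "")) > 20
--     ]
--
--     if not substantive_messages:
--         return "Brief discussion held among board members."
--
--     summary = f"The board engaged in comprehensive discussion on the topic. "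
--     summary += f"A total of {len(substantive_messages)} substantive contributions were made "
--     summary += f"by {len(set(entry['speaker'] for entry in substantive_messages))} participants. "
--
--     # Identify key themes if possible
--     all_text = " ".join([entry["message"] for entry in substantive_messages])
--     if "strategy" in all_text.lower():
--         summary += (
--             "Strategic considerations were emphasized throughout the discussion. "
--         )
--     if "implementation" in all_text.lower():
--         summary += "Implementation approaches were thoroughly examined. "
--
--     return summary
-- ===== SOURCE B (Python) =====
-- def _generate_formal_discussion_summary(conversation_log, participants):
--     """Generate a formal summary of the discussion (single-pass rewrite)."""
--     if not conversation_log: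
--         return "No detailed discussion recorded."
--
--     count = 0
--     speakers = set()
--     found_strategy = False
--     found_implementation = False
--     for entry in conversation_log:
--         message = entry.get("message", "")
--         if len(message) > 20:
--             count += 1
--             speakers.add(entry["speaker"])
--             low = message.lower()
--             found_strategy = found_strategy or "strategy" in low
--             found_implementation = found_implementation or "implementation" in low
--
--     if count == 0:
--         return "Brief discussion held among board members."
--
--     summary = "The board engaged in comprehensive discussion on the topic. "
--     summary += f"A total of {count} substantive contributions were made "
--     summary += f"by {len(speakers)} participants. "
--     if found_strategy:
--         summary += "Strategic considerations were emphasized throughout the discussion. "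
--     if found_implementation:
--         summary += "Implementation approaches were thoroughly examined. "
--     return summary
-- ===== Notes on version B (the rewrite author's own statement) =====
-- stated objective: alternative
-- what changed: One pass over the log accumulating a count, a speaker set and two lowercase-substring flags replaces A's filtered intermediate list, the set comprehension over it and the joined all_text string that A builds and scans; the per-message substring test is exact because neither keyword contains the join separator.
import Mathlib
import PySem

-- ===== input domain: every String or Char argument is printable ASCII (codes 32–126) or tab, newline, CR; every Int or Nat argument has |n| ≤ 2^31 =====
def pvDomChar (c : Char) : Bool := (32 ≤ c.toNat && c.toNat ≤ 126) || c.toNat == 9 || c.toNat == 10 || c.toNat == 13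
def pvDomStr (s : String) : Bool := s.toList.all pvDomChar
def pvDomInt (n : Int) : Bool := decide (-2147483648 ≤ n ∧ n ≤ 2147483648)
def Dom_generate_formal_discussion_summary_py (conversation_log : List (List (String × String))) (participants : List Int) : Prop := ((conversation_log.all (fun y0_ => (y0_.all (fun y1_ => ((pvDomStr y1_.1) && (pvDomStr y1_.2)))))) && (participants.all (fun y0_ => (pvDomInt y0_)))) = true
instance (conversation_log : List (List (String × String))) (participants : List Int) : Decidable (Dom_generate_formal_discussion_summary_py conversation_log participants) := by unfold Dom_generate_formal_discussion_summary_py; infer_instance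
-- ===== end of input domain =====

-- B replaces A's filtered list, set comprehension and joined all_text scan by one fold that keeps a
-- count, a speaker set and two per-message lowercase-substring flags (objective: alternative, same cost).

-- ===== PORT A =====
-- entry.get("message", "") : first-match association-list lookup with default
def pvGetMsg (e : List (String × String)) : String := (List.lookup "message" e).getD ""
-- entry["speaker"] : exact under Pre_ (the key is present there; Python raises KeyError otherwise)
def pvGetSpk (e : List (String × String)) : String := (List.lookup "speaker" e).getD ""

def generate_formal_discussion_summary_py (conversation_log : List (List (String × String))) (participants : List Int) : String :=
  if conversation_log = [] then "No detailed discussion recorded."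
  else
    let substantive_messages := conversation_log.filter (fun e => decide ((20 : Int) < PySem.Str.len (pvGetMsg e)))
    if substantive_messages = [] then "Brief discussion held among board members."
    else
      let summary := "The board engaged in comprehensive discussion on the topic. "
      let summary := summary ++ "A total of " ++ PySem.Int.toStr (substantive_messages.length : Int) ++ " substantive contributions were made "
      let summary := summary ++ "by " ++ PySem.Int.toStr (PySem.Set.len (PySem.Set.ofList (substantive_messages.map pvGetSpk))) ++ " participants. "
      let all_text := PySem.Str.join " " (substantive_messages.map pvGetMsg)
      let summary := if PySem.Str.isIn "strategy" (PySem.Str.lower all_text) then summary ++ "Strategic considerations were emphasized throughout the discussion. " else summary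
      let summary := if PySem.Str.isIn "implementation" (PySem.Str.lower all_text) then summary ++ "Implementation approaches were thoroughly examined. " else summary
      summary

-- ===== PORT B =====
-- loop body: state = (count, speakers, found_strategy, found_implementation)
def pvStep (acc : Int × PySem.Set String × Bool × Bool) (e : List (String × String)) : Int × PySem.Set String × Bool × Bool :=
  let message := pvGetMsg e
  if (20 : Int) < PySem.Str.len message then
    let low := PySem.Str.lower message
    (acc.1 + 1, PySem.Set.add acc.2.1 (pvGetSpk e),
     acc.2.2.1 || PySem.Str.isIn "strategy" low,
     acc.2.2.2 || PySem.Str.isIn "implementation" low)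
  else acc

def generate_formal_discussion_summary_py_alt (conversation_log : List (List (String × String))) (participants : List Int) : String :=
  if conversation_log = [] then "No detailed discussion recorded."
  else
    let st := conversation_log.foldl pvStep (0, PySem.Set.empty, false, false)
    if st.1 = 0 then "Brief discussion held among board members."
    else
      let summary := "The board engaged in comprehensive discussion on the topic. "
      let summary := summary ++ "A total of " ++ PySem.Int.toStr st.1 ++ " substantive contributions were made "
      let summary := summary ++ "by " ++ PySem.Int.toStr (PySem.Set.len st.2.1) ++ " participants. "
      let summary := if st.2.2.1 then summary ++ "Strategic considerations were emphasized throughout the discussion. " else summary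
      let summary := if st.2.2.2 then summary ++ "Implementation approaches were thoroughly examined. " else summary
      summary

-- ===== PRECONDITION & SPEC =====
-- Pre_ excludes exactly the inputs where Python A raises KeyError: a substantive entry
-- (message longer than 20 characters) without a "speaker" key.
def Pre_generate_formal_discussion_summary_py (conversation_log : List (List (String × String))) (participants : List Int) : Prop :=
  ∀ e ∈ conversation_log, (20 : Int) < PySem.Str.len ((List.lookup "message" e).getD "") → (List.lookup "speaker" e).isSome
instance (conversation_log : List (List (String × String))) (participants : List Int) : Decidable (Pre_generate_formal_discussion_summary_py conversation_log participants) := by unfold Pre_generate_formal_discussion_summary_py; infer_instance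

def pvWitness_generate_formal_discussion_summary_py : (List (List (String × String))) × List Int :=
  ([[("speaker", "alice"), ("message", "a long strategy message here")], [("speaker", "bob")]], [1, 2])

def Spec_generate_formal_discussion_summary_py (conversation_log : List (List (String × String))) (participants : List Int) (out : String) : Prop := out = generate_formal_discussion_summary_py_alt conversation_log participants
instance (conversation_log : List (List (String × String))) (participants : List Int) (out : String) : Decidable (Spec_generate_formal_discussion_summary_py conversation_log participants out) := by unfold Spec_generate_formal_discussion_summary_py; infer_instance

-- ===== CLAIM (what is proved, stated in full; the proofs are below) =====
def Claim_equal_generate_formal_discussion_summary_py : Prop := ∀ (conversation_log : List (List (String × String))) (participants : List Int), Dom_generate_formal_discussion_summary_py conversation_log participants → Pre_generate_formal_discussion_summary_py conversation_log participants → Spec_generate_formal_discussion_summary_py conversation_log participants (generate_formal_discussion_summary_py conversation_log participants)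

-- ===== LEMMAS AND PROOFS =====

-- the filter predicate A uses
def pvSub (e : List (String × String)) : Bool := decide ((20 : Int) < PySem.Str.len (pvGetMsg e))

-- an occurrence of a separator-free nonempty pattern in `a ++ c :: b` lies in `a` or in `b`
theorem pv_infix_append_cons {needle a b : List Char} {c : Char} (hc : c ∉ needle) :
    needle <:+: (a ++ c :: b) ↔ needle <:+: a ∨ needle <:+: b := by
  constructor
  · rintro ⟨s, t, h⟩
    by_cases h1 : s.length + needle.length ≤ a.length
    · left
      have hs : s.length ≤ a.length := by omega
      have ha : a = (s ++ needle ++ t).take a.length := by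
        rw [h]; exact (List.take_left).symm
      rw [List.append_assoc, List.take_append, List.take_append,
          List.take_of_length_le hs, List.take_of_length_le (by omega : needle.length ≤ a.length - s.length)] at ha
      exact ⟨s, _, by rw [List.append_assoc]; exact ha.symm⟩
    · by_cases h2 : a.length + 1 ≤ s.length
      · right
        have hb : b = (s ++ needle ++ t).drop (a.length + 1) := by
          rw [h, List.drop_append, List.drop_of_length_le (by omega : a.length ≤ a.length + 1)]
          simp
        rw [List.append_assoc, List.drop_append_of_le_length (by omega : a.length + 1 ≤ s.length)] at hb
        exact ⟨s.drop (a.length + 1), t, by rw [List.append_assoc]; exact hb.symm⟩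
      · exfalso
        have hidx : (s ++ needle ++ t)[a.length]? = some c := by
          rw [h, List.getElem?_append_right (le_refl a.length)]
          simp
        rw [List.append_assoc, List.getElem?_append_right (by omega : s.length ≤ a.length),
            List.getElem?_append_left (by omega : a.length - s.length < needle.length)] at hidx
        exact hc (List.mem_of_getElem? hidx)
  · rintro (⟨s, t, rfl⟩ | ⟨s, t, rfl⟩)
    · exact ⟨s, t ++ c :: b, by simp⟩
    · exact ⟨a ++ c :: s, t, by simp [List.append_assoc]⟩

-- a separator-free nonempty pattern occurs in " ".join(ls) iff it occurs in some element
theorem pv_infix_join (needle : List Char) (hne : needle ≠ []) (hsp : ' ' ∉ needle) :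
    ∀ ls : List (List Char), (needle <:+: PySem.Chars.join [' '] ls ↔ ∃ m ∈ ls, needle <:+: m)
  | [] => by
      simp only [PySem.Chars.join, List.intercalate, List.intersperse, List.flatten]
      constructor
      · intro h; exact absurd (List.eq_nil_of_infix_nil h) hne
      · rintro ⟨m, hm, -⟩; exact absurd hm (List.not_mem_nil)
  | [x] => by
      have hx : PySem.Chars.join [' '] [x] = x := by
        simp [PySem.Chars.join, List.intercalate, List.intersperse]
      rw [hx]; simp
  | x :: y :: ls => by
      have hx : PySem.Chars.join [' '] (x :: y :: ls) = x ++ ' ' :: PySem.Chars.join [' '] (y :: ls) := by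
        simp [PySem.Chars.join, List.intercalate, List.intersperse]
      rw [hx, pv_infix_append_cons hsp, pv_infix_join needle hne hsp (y :: ls)]
      simp only [List.mem_cons]
      constructor
      · rintro (h | ⟨m, hm, h⟩)
        · exact ⟨x, Or.inl rfl, h⟩
        · exact ⟨m, Or.inr hm, h⟩
      · rintro ⟨m, (rfl | hm), h⟩
        · exact Or.inl h
        · exact Or.inr ⟨m, hm, h⟩

-- lower distributes over the space-join (space is fixed by lowerChar)
theorem pv_lower_join : ∀ ls : List (List Char),
    PySem.Chars.lower (PySem.Chars.join [' '] ls) = PySem.Chars.join [' '] (ls.map PySem.Chars.lower)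
  | [] => rfl
  | [x] => by simp [PySem.Chars.join, List.intercalate, PySem.Chars.lower]
  | x :: y :: ls => by
      have hx : PySem.Chars.join [' '] (x :: y :: ls) = x ++ ' ' :: PySem.Chars.join [' '] (y :: ls) := by
        simp [PySem.Chars.join, List.intercalate, List.intersperse]
      have hx' : PySem.Chars.join [' '] ((x :: y :: ls).map PySem.Chars.lower) =
          PySem.Chars.lower x ++ ' ' :: PySem.Chars.join [' '] ((y :: ls).map PySem.Chars.lower) := by
        simp [PySem.Chars.join, List.intercalate]
      have hspc : PySem.Chars.lowerChar ' ' = ' ' := by decide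
      rw [hx, hx']
      have ih := pv_lower_join (y :: ls)
      simp only [PySem.Chars.lower] at ih ⊢
      simp [ih, hspc]

-- the keyword test on the joined lowered text equals the any-per-message test
theorem pv_isIn_join (needle : String) (hne : needle.toList ≠ []) (hsp : ' ' ∉ needle.toList)
    (msgs : List String) :
    PySem.Str.isIn needle (PySem.Str.lower (PySem.Str.join " " msgs)) =
      msgs.any (fun m => PySem.Str.isIn needle (PySem.Str.lower m)) := by
  by_cases h : msgs.any (fun m => PySem.Str.isIn needle (PySem.Str.lower m)) = true
  · rw [h]
    rw [List.any_eq_true] at h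
    obtain ⟨m, hm, hmin⟩ := h
    simp only [PySem.Str.isIn, PySem.Str.toList_lower] at hmin ⊢
    rw [PySem.Chars.isIn_iff_infix] at hmin ⊢
    rw [PySem.Str.toList_join, show " ".toList = [' '] from rfl, pv_lower_join,
        pv_infix_join needle.toList hne hsp]
    exact ⟨PySem.Chars.lower m.toList, by
      simp only [List.map_map]
      exact List.mem_map.mpr ⟨m, hm, rfl⟩, hmin⟩
  · rw [eq_false_of_ne_true h, ← Bool.not_eq_true]
    intro hA
    apply h
    simp only [PySem.Str.isIn, PySem.Str.toList_lower] at hA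
    rw [PySem.Chars.isIn_iff_infix, PySem.Str.toList_join, show " ".toList = [' '] from rfl,
        pv_lower_join, pv_infix_join needle.toList hne hsp] at hA
    obtain ⟨lm, hlm, hin⟩ := hA
    simp only [List.map_map, List.mem_map] at hlm
    obtain ⟨m, hm, rfl⟩ := hlm
    rw [List.any_eq_true]
    refine ⟨m, hm, ?_⟩
    simp only [PySem.Str.isIn, PySem.Str.toList_lower]
    rw [PySem.Chars.isIn_iff_infix]
    exact hin

-- the keyword test A performs on the joined text of the filtered entries, as B's any-flag
theorem pv_keyword (needle : String) (hne : needle.toList ≠ []) (hsp : ' ' ∉ needle.toList)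
    (F : List (List (String × String))) :
    PySem.Str.isIn needle (PySem.Str.lower (PySem.Str.join " " (F.map pvGetMsg))) =
      F.any (fun e => PySem.Str.isIn needle (PySem.Str.lower (pvGetMsg e))) := by
  rw [pv_isIn_join needle hne hsp, List.any_map]
  rfl

-- characterisation of B's fold state in terms of A's filtered list
theorem pv_fold_char : ∀ (log : List (List (String × String))) (c : Int) (s : PySem.Set String) (b1 b2 : Bool),
    log.foldl pvStep (c, s, b1, b2) =
      (c + ((log.filter pvSub).length : Int),
       PySem.Set.update s ((log.filter pvSub).map pvGetSpk),
       b1 || (log.filter pvSub).any (fun e => PySem.Str.isIn "strategy" (PySem.Str.lower (pvGetMsg e))),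
       b2 || (log.filter pvSub).any (fun e => PySem.Str.isIn "implementation" (PySem.Str.lower (pvGetMsg e))))
  | [], c, s, b1, b2 => by simp [PySem.Set.update_nil]
  | e :: log, c, s, b1, b2 => by
      rw [List.foldl_cons, List.filter_cons]
      by_cases hp : pvSub e = true
      · rw [if_pos hp]
        have hstep : pvStep (c, s, b1, b2) e =
            (c + 1, PySem.Set.add s (pvGetSpk e),
             b1 || PySem.Str.isIn "strategy" (PySem.Str.lower (pvGetMsg e)),
             b2 || PySem.Str.isIn "implementation" (PySem.Str.lower (pvGetMsg e))) := by
          simp only [pvStep]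
          rw [if_pos (by simpa [pvSub] using hp)]
        rw [hstep, pv_fold_char log]
        simp [PySem.Set.update_cons, List.any_cons, Bool.or_assoc]
        omega
      · rw [if_neg hp]
        have hstep : pvStep (c, s, b1, b2) e = (c, s, b1, b2) := by
          simp only [pvStep]
          rw [if_neg (by simpa [pvSub] using hp)]
        rw [hstep, pv_fold_char log]

-- ===== VERDICT (by name: the statement is the Claim_ definition above) =====
theorem generate_formal_discussion_summary_py_spec : Claim_equal_generate_formal_discussion_summary_py := by
  intro log parts _ _
  unfold Spec_generate_formal_discussion_summary_py
  unfold generate_formal_discussion_summary_py generate_formal_discussion_summary_py_alt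
  by_cases hnil : log = []
  · rw [if_pos hnil, if_pos hnil]
  · rw [if_neg hnil, if_neg hnil]
    rw [show (fun e => decide ((20 : Int) < PySem.Str.len (pvGetMsg e))) = pvSub from rfl]
    rw [pv_fold_char log 0 PySem.Set.empty false false]
    dsimp only
    rw [pv_keyword "strategy" (by decide) (by decide), pv_keyword "implementation" (by decide) (by decide)]
    rw [PySem.Set.update_empty]
    simp only [zero_add, Bool.false_or, Nat.cast_eq_zero, List.length_eq_zero_iff]
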